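-- pv_equiv track=rewrite | github.com/mmmeeedddsss/advent_of_code_2019 | 2019/4.py | is_adj
-- ===== SOURCE A (Python) =====
-- def is_adj(x):
-- 	sx = str(x)
-- 	combo = 1
-- 	has_adj = False
-- 	for i in range(len(sx)-1):
-- 		if sx[i] == sx[i+1]:
-- 			combo += 1
-- 		else:
-- 			has_adj = True
-- 			if combo == 2:
-- 				return 2
-- 			combo = 1
-- 	if combo > 1:
-- 		has_adj = True
-- 		if combo == 2:
-- 			return 2
-- 		combo = 1
-- 	return 3 if has_adj else 0
-- ===== SOURCE B (Python) =====
-- def runs_of(s):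
--     # maximal run lengths of identical adjacent characters, recursively
--     if not s:
--         return []
--     k = 0
--     while k < len(s) and s[k] == s[0]:
--         k += 1
--     return [k] + runs_of(s[k:])
--
--
-- def is_adj(x):
--     sx = str(x)
--     if len(sx) < 2:
--         return 0
--     return 2 if 2 in runs_of(sx) else 3
-- ===== Notes on version B (the rewrite author's own statement) =====
-- stated objective: simpler
-- what changed: Replaces A's single stateful scan (combo counter, has_adj flag, early returns, duplicated end-of-loop logic) with a build-then-query decomposition: recursively materialize the list of maximal run lengths of identical adjacent digits and answer by a membership test on that list.
import Mathlib
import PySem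

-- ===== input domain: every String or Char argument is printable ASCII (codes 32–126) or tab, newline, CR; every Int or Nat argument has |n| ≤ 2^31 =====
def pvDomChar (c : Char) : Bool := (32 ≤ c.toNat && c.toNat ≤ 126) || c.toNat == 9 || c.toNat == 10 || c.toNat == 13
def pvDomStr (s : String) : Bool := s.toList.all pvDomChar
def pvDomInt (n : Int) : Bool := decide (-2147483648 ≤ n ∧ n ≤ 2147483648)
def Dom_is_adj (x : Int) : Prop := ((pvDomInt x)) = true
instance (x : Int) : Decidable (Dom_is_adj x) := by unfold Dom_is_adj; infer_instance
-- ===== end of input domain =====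

-- B is simpler: it materializes the list of maximal run lengths and does a membership
-- test, instead of A's stateful scan with a combo counter, a flag and early returns.

-- ===== PORT A =====
-- A's for-loop over i in range(len(sx)-1) comparing sx[i] with sx[i+1], ported as the
-- obvious structural recursion over adjacent pairs with the same state (combo, has_adj);
-- the early `return 2` becomes returning 2 from the recursion.
def isAdjLoop : List Char → Nat → Bool → Int
  | c :: d :: rest, combo, has_adj =>
      if c = d then isAdjLoop (d :: rest) (combo + 1) has_adj
      else if combo = 2 then 2    -- has_adj would be set True, then early return
      else isAdjLoop (d :: rest) 1 true
  | _, combo, has_adj =>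
      -- after the loop: if combo > 1: has_adj = True; if combo == 2: return 2
      if combo > 1 then (if combo = 2 then (2 : Int) else 3)
      else if has_adj then 3 else 0

def is_adj (x : Int) : Int := isAdjLoop (PySem.Int.toStr x).toList 1 false

-- ===== PORT B =====
-- runs_of(s): maximal run lengths; k counts the leading chars equal to s[0] (takeWhile),
-- then recurse on s[k:] (dropWhile).
def runsOf : List Char → List Nat
  | [] => []
  | c :: l => (1 + (l.takeWhile (· == c)).length) :: runsOf (l.dropWhile (· == c))
  termination_by l => l.length
  decreasing_by
    have := List.length_dropWhile_le (· == c) l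
    simp; omega

def is_adj_alt (x : Int) : Int :=
  let sx := (PySem.Int.toStr x).toList
  if sx.length < 2 then 0
  else if (runsOf sx).contains 2 then 2 else 3

-- ===== PRECONDITION & SPEC =====
def Spec_is_adj (x : Int) (out : Int) : Prop := out = is_adj_alt x
instance (x : Int) (out : Int) : Decidable (Spec_is_adj x out) := by unfold Spec_is_adj; infer_instance

-- ===== CLAIM (what is proved, stated in full; the proofs are below) =====
def Claim_equal_is_adj : Prop := ∀ (x : Int), Dom_is_adj x → Spec_is_adj x (is_adj x)

-- ===== LEMMAS AND PROOFS =====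

-- first run length extended by the combo carried into the loop
def ext (combo : Nat) : List Nat → List Nat
  | [] => []
  | r :: t => (combo - 1 + r) :: t

theorem ext_one (rs : List Nat) : ext 1 rs = rs := by
  cases rs <;> simp [ext]

theorem runsOf_ne_nil (c : Char) (l : List Char) : runsOf (c :: l) ≠ [] := by
  simp [runsOf]

theorem runsOf_cons_cons_eq (c : Char) (rest : List Char) :
    runsOf (c :: c :: rest) =
      (1 + (1 + (rest.takeWhile (· == c)).length)) :: runsOf (rest.dropWhile (· == c)) := by
  simp [runsOf, List.takeWhile, List.dropWhile]
  omega

theorem runsOf_cons_cons_ne (c d : Char) (rest : List Char) (h : ¬ c = d) :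
    runsOf (c :: d :: rest) = 1 :: runsOf (d :: rest) := by
  have hd : (d == c) = false := by
    simp; exact fun hh => h hh.symm
  simp [runsOf, List.takeWhile, List.dropWhile, hd]

theorem loop_inv (l : List Char) (combo : Nat) (ha : Bool)
    (h1 : 1 ≤ combo) (hne : l ≠ []) :
    isAdjLoop l combo ha =
      (if (ext combo (runsOf l)).contains 2 then 2
       else if ext combo (runsOf l) = [1] then (if ha then 3 else 0)
       else 3) := by
  induction l generalizing combo ha with
  | nil => exact absurd rfl hne
  | cons c rest ih =>
    cases rest with
    | nil =>
      -- single char: runsOf [c] = [1], ext combo [1] = [combo]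
      simp only [runsOf, List.takeWhile, List.dropWhile, ext, isAdjLoop]
      rcases Nat.lt_or_ge combo 2 with hc | hc
      · have : combo = 1 := by omega
        subst this
        simp
      · rcases Nat.eq_or_lt_of_le hc with hc2 | hc3
        · simp [← hc2]
        · have hne2 : combo ≠ 2 := by omega
          have hgt : combo > 1 := by omega
          have h12 : combo - 1 + 1 = combo := by omega
          simp [hgt, hne2, h12]
          omega
    | cons d rest' =>
      by_cases hcd : c = d
      · subst hcd
        rw [show isAdjLoop (c :: c :: rest') combo ha
              = isAdjLoop (c :: rest') (combo + 1) ha by simp [isAdjLoop]]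
        rw [ih (combo + 1) ha (by omega) (by simp)]
        have hrw : ext combo (runsOf (c :: c :: rest'))
            = ext (combo + 1) (runsOf (c :: rest')) := by
          rw [runsOf_cons_cons_eq]
          simp only [runsOf, ext]
          congr 1
          omega
        rw [hrw]
      · rw [show isAdjLoop (c :: d :: rest') combo ha
              = (if combo = 2 then 2 else isAdjLoop (d :: rest') 1 true) by
            simp [isAdjLoop, hcd]]
        rw [runsOf_cons_cons_ne c d rest' hcd]
        have h11 : combo - 1 + 1 = combo := by omega
        simp only [ext, h11]
        by_cases hc2 : combo = 2
        · simp [hc2]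
        · rw [if_neg hc2, ih 1 true (by omega) (by simp), ext_one]
          have h2c : ¬ (2 = combo) := fun h => hc2 h.symm
          have hnn := runsOf_ne_nil d rest'
          rcases hr : runsOf (d :: rest') with _ | ⟨r, t⟩
          · exact absurd hr hnn
          · by_cases hm : (2 = r ∨ 2 ∈ t) <;> simp [hm, h2c]

theorem runsOf_two_ne_one (c d : Char) (rest : List Char) :
    runsOf (c :: d :: rest) ≠ [1] := by
  by_cases hcd : c = d
  · subst hcd
    rw [runsOf_cons_cons_eq]
    intro h
    have := List.head_eq_of_cons_eq h
    omega
  · rw [runsOf_cons_cons_ne c d rest hcd]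
    intro h
    exact runsOf_ne_nil d rest (List.tail_eq_of_cons_eq h) |>.elim

theorem main_lemma (l : List Char) :
    isAdjLoop l 1 false =
      (if l.length < 2 then 0 else if (runsOf l).contains 2 then 2 else 3) := by
  cases l with
  | nil => simp [isAdjLoop]
  | cons c rest =>
    cases rest with
    | nil => simp [isAdjLoop]
    | cons d rest' =>
      rw [loop_inv (c :: d :: rest') 1 false (by omega) (by simp), ext_one]
      have hne1 := runsOf_two_ne_one c d rest'
      simp [hne1]

-- ===== VERDICT (by name: the statement is the Claim_ definition above) =====
theorem is_adj_spec : Claim_equal_is_adj := by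
  intro x _
  unfold Spec_is_adj is_adj is_adj_alt
  simp only [main_lemma]
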